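-- pv_equiv track=rewrite | github.com/OpenXiangShan/Penglai-SagittaVerificationPlatform | tgen_reg/reg_pro_v2/parse_xml/parsing_xml.py | extract_all_id
-- ===== SOURCE A (Python) =====
-- def extract_all_id(id_set):
--     trunk_list = []
--     len_id_min = 1000
--     branch_set = set()
--     for un in id_set:
--         un_list = un.split('.')
--         if len_id_min > len(un_list):
--             len_id_min = len(un_list)
--         for un_index, un_value in enumerate(un_list):
--             if not un_index < len(trunk_list):
--                 trunk_list.append(branch_set)
--             tmp_branch_set = set(trunk_list[un_index])
--             if un_value not in tmp_branch_set:
--                 tmp_branch_set.add(un_value)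
--             trunk_list[un_index] = tmp_branch_set
--     return trunk_list
-- ===== SOURCE B (Python) =====
-- def extract_all_id(id_set):
--     all_parts = [un.split('.') for un in id_set]
--     maxlen = max((len(p) for p in all_parts), default=0)
--     return [{p[i] for p in all_parts if i < len(p)} for i in range(maxlen)]
-- ===== Notes on version B (the rewrite author's own statement) =====
-- stated objective: faster
-- what changed: Replaces A's id-major loop that re-copies each per-position set (set(trunk_list[i])) for every part by a position-major transpose: split all ids once, take the maximum part count, and build each position's set once with a comprehension.
import Mathlib
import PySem

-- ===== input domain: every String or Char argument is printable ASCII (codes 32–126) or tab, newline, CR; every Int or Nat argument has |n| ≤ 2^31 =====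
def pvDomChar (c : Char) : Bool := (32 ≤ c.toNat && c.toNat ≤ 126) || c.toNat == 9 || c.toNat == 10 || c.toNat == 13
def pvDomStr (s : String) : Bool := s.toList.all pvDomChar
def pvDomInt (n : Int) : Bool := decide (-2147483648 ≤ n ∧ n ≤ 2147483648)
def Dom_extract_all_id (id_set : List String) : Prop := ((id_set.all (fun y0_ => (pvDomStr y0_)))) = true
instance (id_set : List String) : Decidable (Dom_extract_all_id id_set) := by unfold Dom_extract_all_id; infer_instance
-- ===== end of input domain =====

-- B replaces A's id-major loop (mutating/copying per-position sets in a growing trunk list) by a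
-- position-major transpose over the pre-split parts; same result, simpler decomposition.


-- ===== PORT A =====
-- un.split('.') — the separator "." is non-empty, so PySem.Str.split? always returns some
def pySplitDot (un : String) : List String := (PySem.Str.split? un ".").getD []

-- body of A's inner 'for un_index, un_value in enumerate(un_list)' loop
def pyInnerStep (trunk_list : List (List String)) (p : Int × String) : List (List String) :=
  let trunk_list := if ¬ p.1 < (trunk_list.length : Int) then trunk_list ++ [([] : PySem.Set String)] else trunk_list
  let tmp_branch_set := PySem.Set.ofList (PySem.List.pyGetD trunk_list p.1 [])
  let tmp_branch_set := if ¬ PySem.Set.contains tmp_branch_set p.2 then PySem.Set.add tmp_branch_set p.2 else tmp_branch_set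
  PySem.List.pySetD trunk_list p.1 tmp_branch_set

def extract_all_id (id_set : List String) : List (List String) :=
  (id_set.foldl (fun (st : List (List String) × Int) un =>
      let un_list := pySplitDot un
      let len_id_min := if st.2 > (un_list.length : Int) then (un_list.length : Int) else st.2
      let trunk_list := (PySem.List.enumerate un_list).foldl pyInnerStep st.1
      (trunk_list, len_id_min))
    ([], 1000)).1

-- ===== PORT B =====
def extract_all_id_alt (id_set : List String) : List (List String) :=
  let all_parts := id_set.map (fun un => pySplitDot un)
  let maxlen := (all_parts.map List.length).foldl max 0
  (List.range maxlen).map (fun i =>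
    all_parts.foldl (fun (s : PySem.Set String) p =>
      if h : i < p.length then PySem.Set.add s p[i] else s) [])

-- ===== PRECONDITION & SPEC =====
def Spec_extract_all_id (id_set : List String) (out : List (List String)) : Prop := out = extract_all_id_alt id_set
instance (id_set : List String) (out : List (List String)) : Decidable (Spec_extract_all_id id_set out) := by unfold Spec_extract_all_id; infer_instance

-- ===== CLAIM (what is proved, stated in full; the proofs are below) =====
def Claim_equal_extract_all_id : Prop := ∀ (id_set : List String), Dom_extract_all_id id_set → Spec_extract_all_id id_set (extract_all_id id_set)

-- ===== LEMMAS AND PROOFS =====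

-- per-position set of B, and the maximum number of parts
def colAt (parts : List (List String)) (i : Nat) : PySem.Set String :=
  parts.foldl (fun (s : PySem.Set String) p =>
    if h : i < p.length then PySem.Set.add s p[i] else s) []

def maxLen (parts : List (List String)) : Nat := (parts.map List.length).foldl max 0

def build (parts : List (List String)) : List (List String) :=
  (List.range (maxLen parts)).map (colAt parts)

-- functional form of one pass of A's inner loop: set position k, or extend by one entry
def setOrExtend (T : List (List String)) (k : Nat) (v : String) : List (List String) :=
  if k < T.length then T.set k (PySem.Set.add (T.getD k []) v) else T ++ [[v]]

def upd : List (List String) → Nat → List String → List (List String)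
  | T, _, [] => T
  | T, k, v :: vs => upd (setOrExtend T k v) (k + 1) vs

lemma alt_eq_build (id_set : List String) :
    extract_all_id_alt id_set = build (id_set.map (fun un => pySplitDot un)) := rfl

lemma length_setOrExtend (T : List (List String)) (k : Nat) (v : String) (hk : k ≤ T.length) :
    (setOrExtend T k v).length = max T.length (k + 1) := by
  unfold setOrExtend; split_ifs with h <;> simp <;> omega

lemma getD_setOrExtend (T : List (List String)) (k : Nat) (v : String) (hk : k ≤ T.length) (i : Nat) :
    (setOrExtend T k v).getD i [] =
      if i = k then PySem.Set.add (T.getD i []) v else T.getD i [] := by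
  unfold setOrExtend
  by_cases hik : i = k
  · rw [hik, if_pos rfl]
    split_ifs with h
    · rw [List.getD_eq_getElem _ _ (by simpa using h), List.getElem_set_self]
    · have hek : k = T.length := by omega
      subst hek
      rw [List.getD_eq_getElem _ _ (by simp), List.getElem_append_right (by omega)]
      simp [List.getD_eq_getElem?_getD, PySem.Set.add, PySem.Set.contains]
  · simp only [if_neg hik]
    split_ifs with h
    · simp [List.getD_eq_getElem?_getD, List.getElem?_set_ne (by omega : k ≠ i)]
    · by_cases hlt : i < T.length
      · simp [List.getD_eq_getElem?_getD, List.getElem?_append_left hlt]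
      · rw [List.getD_eq_getElem?_getD, List.getD_eq_getElem?_getD,
          List.getElem?_eq_none (by omega : T.length ≤ i),
          List.getElem?_eq_none (by simp; omega)]

lemma nodup_setOrExtend (T : List (List String)) (k : Nat) (v : String)
    (hT : ∀ t ∈ T, t.Nodup) : ∀ t ∈ setOrExtend T k v, t.Nodup := by
  intro t ht
  unfold setOrExtend at ht
  split_ifs at ht with h
  · rcases List.mem_or_eq_of_mem_set ht with h1 | h1
    · exact hT t h1
    · subst h1
      refine PySem.Set.nodup_add _ _ ?_
      rw [List.getD_eq_getElem _ _ h]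
      exact hT _ (List.getElem_mem h)
  · rcases List.mem_append.mp ht with h1 | h1
    · exact hT t h1
    · simp at h1; subst h1; simp

lemma guard_add (s : PySem.Set String) (v : String) :
    (if ¬ PySem.Set.contains s v then PySem.Set.add s v else s) = PySem.Set.add s v := by
  by_cases hc : PySem.Set.contains s v <;> simp [hc, PySem.Set.add]

lemma istep_eq (T : List (List String)) (k : Nat) (v : String) (hk : k ≤ T.length)
    (hT : ∀ t ∈ T, t.Nodup) : pyInnerStep T ((k : Int), v) = setOrExtend T k v := by
  unfold pyInnerStep setOrExtend
  simp only [guard_add]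
  by_cases h : k < T.length
  · rw [if_neg (show ¬ ¬ (((k:Nat), v).1 < ((T.length:Nat) : Int)) by push_neg; exact_mod_cast h),
      if_pos h]
    show PySem.List.pySetD T (k : Int) _ = _
    rw [PySem.List.pyGetD_natCast]
    rw [PySem.Set.ofList_eq_self_of_nodup]
    · unfold PySem.List.pySetD
      rw [PySem.List.pySet?_natCast _ _ _ h]
      rfl
    · rw [List.getD_eq_getElem _ _ h]
      exact hT _ (List.getElem_mem h)
  · have hek : k = T.length := by omega
    subst hek
    rw [if_pos (show ¬ (((T.length:Nat), v).1 < ((T.length:Nat) : Int)) by simp), if_neg h]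
    show PySem.List.pySetD (T ++ [[]]) ((T.length : Nat) : Int) _ = _
    rw [PySem.List.pyGetD_natCast]
    have hget : (T ++ [([] : List String)]).getD T.length [] = [] := by
      rw [List.getD_eq_getElem _ _ (by simp), List.getElem_append_right (by omega)]
      simp
    rw [hget]
    unfold PySem.List.pySetD
    rw [PySem.List.pySet?_natCast _ _ _ (by simp)]
    simp only [Option.getD_some]
    have : PySem.Set.add (PySem.Set.ofList []) v = [v] := rfl
    rw [this]
    rw [List.set_append_right _ _ (by omega)]
    simp

lemma upd_length (q : List String) : ∀ (k : Nat) (T : List (List String)), k ≤ T.length →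
    (upd T k q).length = max T.length (k + q.length) := by
  induction q with
  | nil => intro k T hk; simp [upd]; omega
  | cons v vs ih =>
    intro k T hk
    rw [upd, ih (k+1) _ (by rw [length_setOrExtend _ _ _ hk]; omega),
      length_setOrExtend _ _ _ hk]
    simp; omega

lemma upd_getD (q : List String) : ∀ (k : Nat) (T : List (List String)), k ≤ T.length → ∀ i,
    (upd T k q).getD i [] =
      if k ≤ i ∧ i < k + q.length then PySem.Set.add (T.getD i []) (q.getD (i - k) "") else T.getD i [] := by
  induction q with
  | nil => intro k T hk i; simp [upd]
  | cons v vs ih =>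
    intro k T hk i
    rw [upd, ih (k+1) _ (by rw [length_setOrExtend _ _ _ hk]; omega) i]
    rw [getD_setOrExtend _ _ _ hk]
    by_cases hik : i = k
    · subst hik
      rw [if_neg (by omega), if_pos rfl, if_pos ⟨le_refl _, by simp⟩]
      simp
    · rw [if_neg hik]
      by_cases hin : k + 1 ≤ i ∧ i < k + 1 + vs.length
      · rw [if_pos hin, if_pos (by simp only [List.length_cons]; omega)]
        have : (v :: vs).getD (i - k) "" = vs.getD (i - (k+1)) "" := by
          have h1 : i - k = (i - (k+1)) + 1 := by omega
          rw [h1]; simp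
        rw [this]
      · rw [if_neg hin, if_neg (by simp at hin ⊢; omega)]

lemma inner_eq (q : List String) : ∀ (k : Nat) (T : List (List String)), k ≤ T.length →
    (∀ t ∈ T, t.Nodup) →
    (PySem.List.enumerate q (k : Int)).foldl pyInnerStep T = upd T k q := by
  induction q with
  | nil => intro k T _ _; simp [PySem.List.enumerate_nil, upd]
  | cons v vs ih =>
    intro k T hk hT
    rw [PySem.List.enumerate_cons, List.foldl_cons, istep_eq T k v hk hT]
    have hcast : ((k : Int) + 1) = ((k + 1 : Nat) : Int) := by push_cast; ring
    rw [hcast, ih (k+1) _ (by rw [length_setOrExtend _ _ _ hk]; omega) (nodup_setOrExtend _ _ _ hT)]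
    rfl

lemma le_maxLen (parts : List (List String)) (p : List String) (hp : p ∈ parts) :
    p.length ≤ maxLen parts :=
  (PySem.List.le_foldl_max (parts.map List.length) 0).2 p.length (List.mem_map_of_mem hp)

lemma foldl_id_of_short (i : Nat) : ∀ (parts : List (List String)) (acc : PySem.Set String),
    (∀ p ∈ parts, p.length ≤ i) →
    parts.foldl (fun (s : PySem.Set String) p =>
      if h : i < p.length then PySem.Set.add s p[i] else s) acc = acc := by
  intro parts
  induction parts with
  | nil => intro acc _; rfl
  | cons p ps ih =>
    intro acc hall
    rw [List.foldl_cons, dif_neg (by have := hall p (by simp); omega)]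
    exact ih acc (fun q hq => hall q (by simp [hq]))

lemma colAt_nil (parts : List (List String)) (i : Nat) (hi : maxLen parts ≤ i) :
    colAt parts i = [] :=
  foldl_id_of_short i parts [] (fun p hp => le_trans (le_maxLen parts p hp) hi)

lemma colAt_nodup_aux (i : Nat) : ∀ (parts : List (List String)) (acc : PySem.Set String),
    acc.Nodup →
    (parts.foldl (fun (s : PySem.Set String) p =>
      if h : i < p.length then PySem.Set.add s p[i] else s) acc).Nodup := by
  intro parts
  induction parts with
  | nil => intro acc h; exact h
  | cons p ps ih =>
    intro acc h
    rw [List.foldl_cons]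
    by_cases hc : i < p.length
    · rw [dif_pos hc]; exact ih _ (PySem.Set.nodup_add _ _ h)
    · rw [dif_neg hc]; exact ih _ h

lemma colAt_nodup (parts : List (List String)) (i : Nat) : (colAt parts i).Nodup :=
  colAt_nodup_aux i parts [] (by simp)

lemma maxLen_append (parts : List (List String)) (q : List String) :
    maxLen (parts ++ [q]) = max (maxLen parts) q.length := by
  simp [maxLen, List.foldl_append]

lemma colAt_append (parts : List (List String)) (q : List String) (i : Nat) :
    colAt (parts ++ [q]) i =
      if h : i < q.length then PySem.Set.add (colAt parts i) q[i] else colAt parts i := by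
  simp [colAt, List.foldl_append]

lemma build_length (parts : List (List String)) : (build parts).length = maxLen parts := by
  simp [build]

lemma build_getD (parts : List (List String)) (i : Nat) (hi : i < maxLen parts) :
    (build parts).getD i [] = colAt parts i := by
  rw [List.getD_eq_getElem _ _ (by simpa [build] using hi)]
  simp [build]

lemma build_getD' (parts : List (List String)) (i : Nat) :
    (build parts).getD i [] = if i < maxLen parts then colAt parts i else [] := by
  split_ifs with h
  · exact build_getD parts i h
  · rw [List.getD_eq_getElem?_getD, List.getElem?_eq_none (by simp [build_length]; omega)]
    rfl

lemma nodup_build (parts : List (List String)) : ∀ t ∈ build parts, t.Nodup := by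
  intro t ht
  simp [build] at ht
  obtain ⟨i, _, hi⟩ := ht
  exact hi ▸ colAt_nodup parts i

lemma inner_build (parts : List (List String)) (q : List String) :
    (PySem.List.enumerate q).foldl pyInnerStep (build parts) = build (parts ++ [q]) := by
  have h0 : (PySem.List.enumerate q : List (Int × String)) = PySem.List.enumerate q ((0 : Nat) : Int) := by norm_num
  rw [h0, inner_eq q 0 (build parts) (by simp) (nodup_build parts)]
  apply List.ext_getElem
  · rw [upd_length q 0 _ (by simp), build_length, build_length, maxLen_append]; simp
  · intro i hi1 hi2
    have hin : i < max (maxLen parts) q.length := by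
      have h2 := hi2; rw [build_length, maxLen_append] at h2; exact h2
    rw [← List.getD_eq_getElem _ [] hi1, ← List.getD_eq_getElem _ [] hi2]
    rw [upd_getD q 0 _ (by simp) i]
    by_cases hq : i < q.length
    · rw [if_pos (by omega : 0 ≤ i ∧ i < 0 + q.length), Nat.sub_zero,
        List.getD_eq_getElem _ _ hq, build_getD', build_getD', colAt_append, maxLen_append,
        dif_pos hq]
      by_cases hm : i < maxLen parts
      · rw [if_pos hm, if_pos (by omega)]
      · rw [if_neg hm, if_pos (by omega), colAt_nil parts i (by omega)]
    · rw [if_neg (by omega)]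
      have hm : i < maxLen parts := by omega
      rw [build_getD', build_getD', colAt_append, maxLen_append, dif_neg hq, if_pos hm,
        if_pos (by omega)]

lemma outer (l : List String) : ∀ (parts : List (List String)) (m : Int),
    ((l.foldl (fun (st : List (List String) × Int) un =>
      let un_list := pySplitDot un
      let len_id_min := if st.2 > (un_list.length : Int) then (un_list.length : Int) else st.2
      let trunk_list := (PySem.List.enumerate un_list).foldl pyInnerStep st.1
      (trunk_list, len_id_min)) (build parts, m)).1)
    = build (parts ++ l.map pySplitDot) := by
  induction l with
  | nil => intro parts m; simp
  | cons x xs ih =>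
    intro parts m
    rw [List.foldl_cons]
    simp only
    rw [inner_build parts (pySplitDot x)]
    rw [ih (parts ++ [pySplitDot x]) _]
    simp

-- ===== VERDICT (by name: the statement is the Claim_ definition above) =====
theorem extract_all_id_spec : Claim_equal_extract_all_id := by
  intro id_set _
  unfold Spec_extract_all_id extract_all_id
  rw [alt_eq_build]
  have h := outer id_set [] 1000
  simpa [build, maxLen] using h
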